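-- pv_equiv track=rewrite | github.com/FeHuX0/AOIS | Lab1/src/bit_utils.py | compare_unsigned_bits
-- ===== SOURCE A (Python) =====
-- from typing import Iterable, List, Tuple
--
-- Bits = List[int]
--
-- def validate_bits(bits: Iterable[int], *, length: int | None = None) -> Bits:
--     """Validate incoming bits and return them as a list."""
--     array = list(bits)
--     if length is not None and len(array) != length:
--         raise ValueError(f"expected {length} bits, got {len(array)}")
--     for bit in array:
--         if bit not in (0, 1):
--             raise ValueError("bits must contain only 0 and 1")
--     return array
--
-- def compare_unsigned_bits(left: Iterable[int], right: Iterable[int]) -> int: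
--     """Compare two unsigned bit arrays of equal length."""
--     a = validate_bits(left)
--     b = validate_bits(right)
--     if len(a) != len(b):
--         raise ValueError("bit arrays must have the same length")
--     for idx in range(len(a)):
--         if a[idx] > b[idx]:
--             return 1
--         if a[idx] < b[idx]:
--             return -1
--     return 0
-- ===== SOURCE B (Python) =====
-- from typing import Iterable, List
--
-- Bits = List[int]
--
-- def validate_bits(bits: Iterable[int], *, length: int | None = None) -> Bits:
--     array = list(bits)
--     if length is not None and len(array) != length:
--         raise ValueError(f"expected {length} bits, got {len(array)}")
--     for bit in array:
--         if bit not in (0, 1):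
--             raise ValueError("bits must contain only 0 and 1")
--     return array
--
-- def compare_unsigned_bits(left: Iterable[int], right: Iterable[int]) -> int:
--     """Compare two unsigned bit arrays of equal length."""
--     a = validate_bits(left)
--     b = validate_bits(right)
--     if len(a) != len(b):
--         raise ValueError("bit arrays must have the same length")
--     va = 0
--     for bit in a:
--         va = va * 2 + bit
--     vb = 0
--     for bit in b:
--         vb = vb * 2 + bit
--     return (va > vb) - (va < vb)
-- ===== Notes on version B (the rewrite author's own statement) =====
-- stated objective: alternative
-- what changed: Replaces the position-by-position early-exit comparison loop with folding each bit array into its unsigned integer value and comparing the two numbers with (va > vb) - (va < vb).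
import Mathlib
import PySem

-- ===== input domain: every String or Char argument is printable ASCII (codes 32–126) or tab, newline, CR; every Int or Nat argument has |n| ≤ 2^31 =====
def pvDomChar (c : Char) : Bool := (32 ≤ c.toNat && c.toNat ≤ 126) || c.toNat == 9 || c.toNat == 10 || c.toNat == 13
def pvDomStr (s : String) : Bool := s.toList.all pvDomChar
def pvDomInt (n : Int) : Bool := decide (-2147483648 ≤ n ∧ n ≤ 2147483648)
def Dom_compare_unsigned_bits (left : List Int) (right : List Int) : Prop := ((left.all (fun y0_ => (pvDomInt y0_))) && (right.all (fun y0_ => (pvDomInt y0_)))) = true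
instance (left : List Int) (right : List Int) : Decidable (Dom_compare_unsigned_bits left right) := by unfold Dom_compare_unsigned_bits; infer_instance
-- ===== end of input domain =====

-- B replaces A's position-by-position early-exit loop with folding each array into its
-- unsigned integer value and comparing the two numbers (return value only; alternative, same cost).

-- ===== PORT A =====
-- A's 'for idx in range(len(a))' loop with early returns, as the obvious structural
-- recursion walking both lists in step (Pre_ guarantees equal lengths, so b[idx] exists).
def pvCmpLoop : List Int → List Int → Int
  | x :: xs, y :: ys => if x > y then 1 else if x < y then -1 else pvCmpLoop xs ys
  | _, _ => 0

def compare_unsigned_bits (left : List Int) (right : List Int) : Int :=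
  -- validate_bits and the length check raise outside Pre_; inside Pre_ they return the lists unchanged
  pvCmpLoop left right

-- ===== PORT B =====
def compare_unsigned_bits_alt (left : List Int) (right : List Int) : Int :=
  let va := left.foldl (fun acc bit => acc * 2 + bit) 0
  let vb := right.foldl (fun acc bit => acc * 2 + bit) 0
  (if va > vb then (1 : Int) else 0) - (if va < vb then (1 : Int) else 0)

-- ===== PRECONDITION & SPEC =====
-- Pre_ excludes exactly the inputs where A raises ValueError: a non-bit element or unequal lengths.
def Pre_compare_unsigned_bits (left : List Int) (right : List Int) : Prop :=
  (∀ x ∈ left, x = 0 ∨ x = 1) ∧ (∀ x ∈ right, x = 0 ∨ x = 1) ∧ left.length = right.length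
instance (left : List Int) (right : List Int) : Decidable (Pre_compare_unsigned_bits left right) := by
  unfold Pre_compare_unsigned_bits; infer_instance

def pvWitness_compare_unsigned_bits : List Int × List Int := ([1, 0, 1], [0, 1, 1])

def Spec_compare_unsigned_bits (left : List Int) (right : List Int) (out : Int) : Prop := out = compare_unsigned_bits_alt left right
instance (left : List Int) (right : List Int) (out : Int) : Decidable (Spec_compare_unsigned_bits left right out) := by unfold Spec_compare_unsigned_bits; infer_instance

-- ===== CLAIM (what is proved, stated in full; the proofs are below) =====
def Claim_equal_compare_unsigned_bits : Prop := ∀ (left : List Int) (right : List Int), Dom_compare_unsigned_bits left right → Pre_compare_unsigned_bits left right → Spec_compare_unsigned_bits left right (compare_unsigned_bits left right)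

-- ===== LEMMAS AND PROOFS =====

-- the numeric value of a bit list, as B's fold computes it
def pvVal (l : List Int) : Int := l.foldl (fun acc bit => acc * 2 + bit) 0

lemma pvVal_shift (l : List Int) (acc : Int) :
    l.foldl (fun acc bit => acc * 2 + bit) acc = acc * 2 ^ l.length + pvVal l := by
  induction l generalizing acc with
  | nil => simp [pvVal]
  | cons x xs ih =>
    simp only [List.foldl_cons, List.length_cons, pvVal]
    rw [ih (acc * 2 + x), ih (0 * 2 + x)]
    ring

lemma pvVal_cons (x : Int) (xs : List Int) :
    pvVal (x :: xs) = x * 2 ^ xs.length + pvVal xs := by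
  simpa [pvVal] using pvVal_shift xs x

lemma pvVal_nonneg (l : List Int) (h : ∀ x ∈ l, x = 0 ∨ x = 1) : 0 ≤ pvVal l := by
  induction l with
  | nil => simp [pvVal]
  | cons x xs ih =>
    have hx := h x (by simp)
    have hxs := ih (fun y hy => h y (List.mem_cons_of_mem _ hy))
    have hp : (0:Int) < 2 ^ xs.length := by positivity
    rw [pvVal_cons]
    rcases hx with rfl | rfl <;> linarith

lemma pvVal_lt (l : List Int) (h : ∀ x ∈ l, x = 0 ∨ x = 1) : pvVal l < 2 ^ l.length := by
  induction l with
  | nil => simp [pvVal]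
  | cons x xs ih =>
    have hx := h x (by simp)
    have hxs := ih (fun y hy => h y (List.mem_cons_of_mem _ hy))
    have hp : (0:Int) < 2 ^ xs.length := by positivity
    rw [pvVal_cons, List.length_cons, pow_succ]
    rcases hx with rfl | rfl <;> linarith

lemma pvCmpLoop_eq_val_cmp (a b : List Int)
    (ha : ∀ x ∈ a, x = 0 ∨ x = 1) (hb : ∀ x ∈ b, x = 0 ∨ x = 1)
    (hlen : a.length = b.length) :
    pvCmpLoop a b =
      (if pvVal a > pvVal b then (1 : Int) else 0) - (if pvVal a < pvVal b then (1 : Int) else 0) := by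
  induction a generalizing b with
  | nil =>
    cases b with
    | nil => simp [pvCmpLoop, pvVal]
    | cons y ys => simp at hlen
  | cons x xs ih =>
    cases b with
    | nil => simp at hlen
    | cons y ys =>
      have hx := ha x (by simp)
      have hy := hb y (by simp)
      have hxs : ∀ z ∈ xs, z = 0 ∨ z = 1 := fun z hz => ha z (List.mem_cons_of_mem _ hz)
      have hys : ∀ z ∈ ys, z = 0 ∨ z = 1 := fun z hz => hb z (List.mem_cons_of_mem _ hz)
      have hlen' : xs.length = ys.length := by simpa using hlen
      have h1 := pvVal_nonneg xs hxs
      have h2 := pvVal_nonneg ys hys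
      have h3 := pvVal_lt xs hxs
      have h4 : pvVal ys < 2 ^ xs.length := hlen' ▸ pvVal_lt ys hys
      rw [pvVal_cons, pvVal_cons, ← hlen']
      simp only [pvCmpLoop]
      rcases hx with rfl | rfl <;> rcases hy with rfl | rfl
      · simp only [zero_mul, zero_add, lt_irrefl, if_false]
        exact ih ys hxs hys hlen'
      · rw [if_neg (by norm_num), if_pos (by norm_num), if_neg (by linarith), if_pos (by linarith)]
        norm_num
      · rw [if_pos (by norm_num), if_pos (by linarith), if_neg (by linarith)]
        norm_num
      · simp only [lt_irrefl, if_false, gt_iff_lt, one_mul, add_lt_add_iff_left]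
        simpa [gt_iff_lt] using ih ys hxs hys hlen'

-- ===== VERDICT (by name: the statement is the Claim_ definition above) =====
theorem compare_unsigned_bits_spec : Claim_equal_compare_unsigned_bits := by
  intro left right _ hpre
  obtain ⟨ha, hb, hlen⟩ := hpre
  show compare_unsigned_bits left right = compare_unsigned_bits_alt left right
  unfold compare_unsigned_bits compare_unsigned_bits_alt
  simpa [pvVal] using pvCmpLoop_eq_val_cmp left right ha hb hlen
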